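-- pv_equiv track=rewrite | github.com/EduLH/Python | leet_problems.py | non_maching_chars
-- ===== SOURCE A (Python) =====
-- import collections
--
-- def non_maching_chars(str1, str2):
--     col_str1 = collections.Counter(str1)
--     col_str2 = collections.Counter(str2)
--     missing_chars = []
--     chars = sorted(set(str1 + str2))
--     for char in chars:
--         if col_str1[char] != col_str2[char]:
--             missing_chars.append(char)
--     return missing_chars
-- ===== SOURCE B (Python) =====
-- def _merge(a, b):
--     # a, b: sorted lists of 1-char strings; compare runs of equal chars in lockstep
--     if not a and not b:
--         return []
--     if not a:
--         c = b[0]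
--     elif not b:
--         c = a[0]
--     else:
--         c = a[0] if a[0] < b[0] else b[0]
--     ca = 0
--     while ca < len(a) and a[ca] == c:
--         ca += 1
--     cb = 0
--     while cb < len(b) and b[cb] == c:
--         cb += 1
--     rest = _merge(a[ca:], b[cb:])
--     return ([c] + rest) if ca != cb else rest
--
--
-- def non_maching_chars(str1, str2):
--     return _merge(sorted(str1), sorted(str2))
-- ===== Notes on version B (the rewrite author's own statement) =====
-- stated objective: alternative
-- what changed: Replaces Counter-based counting and the compare-loop over sorted(set(...)) by sorting both strings and a recursive two-pointer merge that compares run lengths of equal characters, emitting a character when its runs differ; no hash counting or set is used.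
import Mathlib
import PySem

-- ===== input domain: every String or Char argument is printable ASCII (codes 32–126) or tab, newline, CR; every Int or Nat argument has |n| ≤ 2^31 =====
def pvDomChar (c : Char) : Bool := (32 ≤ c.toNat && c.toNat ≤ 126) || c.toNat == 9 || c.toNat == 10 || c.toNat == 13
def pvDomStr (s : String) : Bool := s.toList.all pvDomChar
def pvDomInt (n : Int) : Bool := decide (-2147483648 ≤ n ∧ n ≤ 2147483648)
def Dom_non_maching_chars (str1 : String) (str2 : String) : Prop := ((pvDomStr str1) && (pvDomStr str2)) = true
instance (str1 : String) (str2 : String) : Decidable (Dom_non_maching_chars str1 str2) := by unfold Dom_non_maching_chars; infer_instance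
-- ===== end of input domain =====

-- B replaces A's Counters and compare-loop over sorted(set(...)) by sorting both strings and
-- a recursive merge comparing run lengths of equal characters (alternative algorithm; similar cost).

-- ===== PORT A =====
def non_maching_chars (str1 : String) (str2 : String) : List String :=
  let col_str1 := PySem.Dict.counter str1.toList
  let col_str2 := PySem.Dict.counter str2.toList
  let chars := PySem.List.sorted (PySem.Set.ofList (str1.toList ++ str2.toList)) (fun x => x) false
  chars.foldl (fun missing ch =>
    if col_str1.getD ch 0 ≠ col_str2.getD ch 0 then missing ++ [String.ofList [ch]] else missing) []

-- ===== PORT B =====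
-- termination helper for the port: dropping a leading run shortens a nonempty list
lemma pvDropRunLt (c : Char) (l : List Char) (h : l.head? = some c) :
    (l.dropWhile (fun x => x == c)).length < l.length := by
  cases l with
  | nil => simp at h
  | cons a t =>
    have hac : a = c := by simpa using h
    subst hac
    simp only [List.dropWhile_cons, beq_self_eq_true, if_true, List.length_cons]
    exact Nat.lt_succ_of_le (List.length_dropWhile_le _ _)

-- recursive run-comparing merge of two sorted char lists (= _merge in Source B; the index-run
-- while loops are takeWhile/dropWhile on the sorted lists)
def nmMerge : List Char → List Char → List Char
  | [], [] => []
  | a :: as₀, [] =>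
    let c := a
    let ra := ((a :: as₀).takeWhile (fun x => x == c)).length
    let rest := nmMerge ((a :: as₀).dropWhile (fun x => x == c)) []
    if ra ≠ 0 then c :: rest else rest
  | [], b :: bs₀ =>
    let c := b
    let rb := ((b :: bs₀).takeWhile (fun x => x == c)).length
    let rest := nmMerge [] ((b :: bs₀).dropWhile (fun x => x == c))
    if (0 : Nat) ≠ rb then c :: rest else rest
  | a :: as₀, b :: bs₀ =>
    let c := if a < b then a else b
    let ra := ((a :: as₀).takeWhile (fun x => x == c)).length
    let rb := ((b :: bs₀).takeWhile (fun x => x == c)).length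
    let rest := nmMerge ((a :: as₀).dropWhile (fun x => x == c)) ((b :: bs₀).dropWhile (fun x => x == c))
    if ra ≠ rb then c :: rest else rest
termination_by as bs => as.length + bs.length
decreasing_by
  · have := pvDropRunLt a (a :: as₀) rfl
    simp only [List.length_cons, List.length_nil] at this ⊢
    omega
  · have := pvDropRunLt b (b :: bs₀) rfl
    simp only [List.length_cons, List.length_nil] at this ⊢
    omega
  · by_cases hab : a < b
    · simp only [hab, reduceDIte]
      have h1 := pvDropRunLt a (a :: as₀) rfl
      have h2 := List.length_dropWhile_le (fun x => x == a) (b :: bs₀)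
      simp only [List.length_cons] at *
      omega
    · simp only [hab, reduceDIte]
      have h1 := List.length_dropWhile_le (fun x => x == b) (a :: as₀)
      have h2 := pvDropRunLt b (b :: bs₀) rfl
      simp only [List.length_cons] at *
      omega

def non_maching_chars_alt (str1 : String) (str2 : String) : List String :=
  (nmMerge (PySem.List.sorted str1.toList (fun x => x) false)
           (PySem.List.sorted str2.toList (fun x => x) false)).map (fun c => String.ofList [c])

-- ===== PRECONDITION & SPEC =====
def Spec_non_maching_chars (str1 : String) (str2 : String) (out : List String) : Prop := out = non_maching_chars_alt str1 str2
instance (str1 : String) (str2 : String) (out : List String) : Decidable (Spec_non_maching_chars str1 str2 out) := by unfold Spec_non_maching_chars; infer_instance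

-- ===== CLAIM (what is proved, stated in full; the proofs are below) =====
def Claim_equal_non_maching_chars : Prop := ∀ (str1 : String) (str2 : String), Dom_non_maching_chars str1 str2 → Spec_non_maching_chars str1 str2 (non_maching_chars str1 str2)

-- ===== LEMMAS AND PROOFS =====

-- A's append-if loop is a filter followed by a map
lemma foldl_append_if_map {p : Char → Prop} [DecidablePred p] (f : Char → String)
    (l : List Char) (acc : List String) :
    l.foldl (fun a ch => if p ch then a ++ [f ch] else a) acc
      = acc ++ (l.filter (fun ch => decide (p ch))).map f := by
  induction l generalizing acc with
  | nil => simp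
  | cons x xs ih =>
    simp only [List.foldl_cons, List.filter_cons, ih]
    by_cases h : p x <;> simp [h]

-- after dropping the leading run of c from a sorted list bounded below by c, everything exceeds c
lemma mem_dropWhile_gt (c : Char) (l : List Char) (hs : l.Pairwise (· ≤ ·))
    (hlb : ∀ x ∈ l, c ≤ x) : ∀ x ∈ l.dropWhile (fun y => y == c), c < x := by
  induction l with
  | nil => simp
  | cons a t ih =>
    rw [List.pairwise_cons] at hs
    by_cases hac : a = c
    · subst hac
      simp only [List.dropWhile_cons, beq_self_eq_true, if_true]
      exact ih hs.2 (fun x hx => hs.1 x hx)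
    · have hca : c < a := lt_of_le_of_ne (hlb a (by simp)) (fun h => hac h.symm)
      simp only [List.dropWhile_cons, beq_iff_eq, hac, if_false]
      intro x hx
      rcases List.mem_cons.mp hx with rfl | hx
      · exact hca
      · exact lt_of_lt_of_le hca (hs.1 x hx)

-- the count of c in such a list is the length of its leading run
lemma count_eq_length_takeWhile (c : Char) (l : List Char) (hs : l.Pairwise (· ≤ ·))
    (hlb : ∀ x ∈ l, c ≤ x) : l.count c = (l.takeWhile (fun y => y == c)).length := by
  conv_lhs => rw [← List.takeWhile_append_dropWhile (p := fun y => y == c) (l := l)]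
  rw [List.count_append]
  have h1 : (l.takeWhile (fun y => y == c)).count c = (l.takeWhile (fun y => y == c)).length := by
    apply List.count_eq_length.mpr
    intro x hx
    have h := List.mem_takeWhile_imp hx
    simp only [beq_iff_eq] at h
    exact h.symm
  have h2 : (l.dropWhile (fun y => y == c)).count c = 0 := by
    apply List.count_eq_zero.mpr
    intro hmem
    exact absurd rfl (ne_of_gt (mem_dropWhile_gt c l hs hlb c hmem))
  omega

-- counts of any other character survive dropping the run of c
lemma count_dropWhile_ne (c x : Char) (l : List Char) (hx : x ≠ c) :
    (l.dropWhile (fun y => y == c)).count x = l.count x := by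
  conv_rhs => rw [← List.takeWhile_append_dropWhile (p := fun y => y == c) (l := l)]
  rw [List.count_append]
  have h0 : (l.takeWhile (fun y => y == c)).count x = 0 := by
    apply List.count_eq_zero.mpr
    intro hmem
    have h := List.mem_takeWhile_imp hmem
    simp only [beq_iff_eq] at h
    exact hx h
  omega

lemma pairwise_dropWhile (c : Char) (l : List Char) (hs : l.Pairwise (· ≤ ·)) :
    (l.dropWhile (fun y => y == c)).Pairwise (· ≤ ·) :=
  hs.sublist (List.dropWhile_sublist _)

-- one step of the merge: the shared shape of all three nonempty arms of nmMerge
lemma nmMerge_step (c : Char) (as bs : List Char)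
    (ha : as.Pairwise (· ≤ ·)) (hb : bs.Pairwise (· ≤ ·))
    (hlba : ∀ x ∈ as, c ≤ x) (hlbb : ∀ x ∈ bs, c ≤ x)
    (ihp : (nmMerge (as.dropWhile (fun y => y == c)) (bs.dropWhile (fun y => y == c))).Pairwise (· < ·))
    (ihm : ∀ x, x ∈ nmMerge (as.dropWhile (fun y => y == c)) (bs.dropWhile (fun y => y == c)) ↔
      (as.dropWhile (fun y => y == c)).count x ≠ (bs.dropWhile (fun y => y == c)).count x) :
    (if (as.takeWhile (fun y => y == c)).length ≠ (bs.takeWhile (fun y => y == c)).length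
      then c :: nmMerge (as.dropWhile (fun y => y == c)) (bs.dropWhile (fun y => y == c))
      else nmMerge (as.dropWhile (fun y => y == c)) (bs.dropWhile (fun y => y == c))).Pairwise (· < ·) ∧
    ∀ x, x ∈ (if (as.takeWhile (fun y => y == c)).length ≠ (bs.takeWhile (fun y => y == c)).length
      then c :: nmMerge (as.dropWhile (fun y => y == c)) (bs.dropWhile (fun y => y == c))
      else nmMerge (as.dropWhile (fun y => y == c)) (bs.dropWhile (fun y => y == c))) ↔
      as.count x ≠ bs.count x := by
  have hgta := mem_dropWhile_gt c as ha hlba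
  have hgtb := mem_dropWhile_gt c bs hb hlbb
  have hmemP : ∀ x ∈ nmMerge (as.dropWhile (fun y => y == c)) (bs.dropWhile (fun y => y == c)), c < x := by
    intro x hx
    have hcnt := (ihm x).mp hx
    by_cases hxa : x ∈ as.dropWhile (fun y => y == c)
    · exact hgta x hxa
    · by_cases hxb : x ∈ bs.dropWhile (fun y => y == c)
      · exact hgtb x hxb
      · exact (hcnt (by simp [List.count_eq_zero.mpr hxa, List.count_eq_zero.mpr hxb])).elim
  have hca : as.count c = (as.takeWhile (fun y => y == c)).length :=
    count_eq_length_takeWhile c as ha hlba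
  have hcb : bs.count c = (bs.takeWhile (fun y => y == c)).length :=
    count_eq_length_takeWhile c bs hb hlbb
  have hmem : ∀ x, x ∈ (if (as.takeWhile (fun y => y == c)).length ≠ (bs.takeWhile (fun y => y == c)).length
      then c :: nmMerge (as.dropWhile (fun y => y == c)) (bs.dropWhile (fun y => y == c))
      else nmMerge (as.dropWhile (fun y => y == c)) (bs.dropWhile (fun y => y == c))) ↔
      as.count x ≠ bs.count x := by
    intro x
    by_cases hxc : x = c
    · rw [hxc]
      have hnp : c ∉ nmMerge (as.dropWhile (fun y => y == c)) (bs.dropWhile (fun y => y == c)) :=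
        fun h => absurd rfl (ne_of_gt (hmemP c h))
      split_ifs with hr
      · simp only [List.mem_cons, true_or, true_iff]
        omega
      · simp only [hnp, false_iff, not_not]
        omega
    · have hx' : x ∈ nmMerge (as.dropWhile (fun y => y == c)) (bs.dropWhile (fun y => y == c)) ↔
          as.count x ≠ bs.count x := by
        rw [ihm x, count_dropWhile_ne c x _ hxc, count_dropWhile_ne c x _ hxc]
      split_ifs with hr
      · simp only [List.mem_cons, hxc, false_or]; exact hx'
      · exact hx'
  refine ⟨?_, hmem⟩
  split_ifs with hr
  · exact List.pairwise_cons.mpr ⟨hmemP, ihp⟩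
  · exact ihp

-- main characterisation of the merge: strictly increasing, members = chars with differing counts
lemma nmMerge_spec_aux : ∀ (n : Nat) (as bs : List Char), as.length + bs.length ≤ n →
    as.Pairwise (· ≤ ·) → bs.Pairwise (· ≤ ·) →
    (nmMerge as bs).Pairwise (· < ·) ∧ ∀ x, x ∈ nmMerge as bs ↔ as.count x ≠ bs.count x := by
  intro n
  induction n with
  | zero =>
    intro as bs hlen _ _
    have h1 : as = [] := List.length_eq_zero_iff.mp (by omega)
    have h2 : bs = [] := List.length_eq_zero_iff.mp (by omega)
    subst h1; subst h2
    simp [nmMerge]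
  | succ n ih =>
    intro as bs hlen ha hb
    rcases as with _ | ⟨a, as₀⟩ <;> rcases bs with _ | ⟨b, bs₀⟩
    · simp [nmMerge]
    · -- [], b :: bs₀
      have hlbb : ∀ x ∈ b :: bs₀, b ≤ x := by
        intro x hx
        rcases List.mem_cons.mp hx with rfl | hx
        · exact le_refl x
        · exact (List.pairwise_cons.mp hb).1 x hx
      have hdec := pvDropRunLt b (b :: bs₀) rfl
      obtain ⟨ihp, ihm⟩ := ih [] ((b :: bs₀).dropWhile (fun y => y == b))
        (by simp only [List.length_cons, List.length_nil] at *; omega)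
        (by simp) (pairwise_dropWhile b _ hb)
      have := nmMerge_step b [] (b :: bs₀) (by simp) hb (by simp) hlbb
        (by simpa using ihp) (by simpa using ihm)
      simpa [nmMerge] using this
    · -- a :: as₀, []
      have hlba : ∀ x ∈ a :: as₀, a ≤ x := by
        intro x hx
        rcases List.mem_cons.mp hx with rfl | hx
        · exact le_refl x
        · exact (List.pairwise_cons.mp ha).1 x hx
      have hdec := pvDropRunLt a (a :: as₀) rfl
      obtain ⟨ihp, ihm⟩ := ih ((a :: as₀).dropWhile (fun y => y == a)) []
        (by simp only [List.length_cons, List.length_nil] at *; omega)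
        (pairwise_dropWhile a _ ha) (by simp)
      have := nmMerge_step a (a :: as₀) [] ha (by simp) hlba (by simp)
        (by simpa using ihp) (by simpa using ihm)
      simpa [nmMerge] using this
    · -- a :: as₀, b :: bs₀
      set c : Char := if a < b then a else b with hc
      have hca : c ≤ a := by
        rw [hc]; split_ifs with h
        · exact le_refl a
        · exact le_of_not_gt h
      have hcb : c ≤ b := by
        rw [hc]; split_ifs with h
        · exact le_of_lt h
        · exact le_refl b
      have hlba : ∀ x ∈ a :: as₀, c ≤ x := by
        intro x hx
        rcases List.mem_cons.mp hx with rfl | hx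
        · exact hca
        · exact le_trans hca ((List.pairwise_cons.mp ha).1 x hx)
      have hlbb : ∀ x ∈ b :: bs₀, c ≤ x := by
        intro x hx
        rcases List.mem_cons.mp hx with rfl | hx
        · exact hcb
        · exact le_trans hcb ((List.pairwise_cons.mp hb).1 x hx)
      have hdec : ((a :: as₀).dropWhile (fun y => y == c)).length +
          ((b :: bs₀).dropWhile (fun y => y == c)).length ≤ n := by
        rcases (by rw [hc]; split_ifs <;> simp : c = a ∨ c = b) with h | h
        · have h1 := pvDropRunLt c (a :: as₀) (by rw [h]; rfl)
          have h2 := List.length_dropWhile_le (fun y => y == c) (b :: bs₀)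
          simp only [List.length_cons] at *
          omega
        · have h1 := List.length_dropWhile_le (fun y => y == c) (a :: as₀)
          have h2 := pvDropRunLt c (b :: bs₀) (by rw [h]; rfl)
          simp only [List.length_cons] at *
          omega
      obtain ⟨ihp, ihm⟩ := ih ((a :: as₀).dropWhile (fun y => y == c))
        ((b :: bs₀).dropWhile (fun y => y == c)) hdec
        (pairwise_dropWhile c _ ha) (pairwise_dropWhile c _ hb)
      have := nmMerge_step c (a :: as₀) (b :: bs₀) ha hb hlba hlbb ihp ihm
      simpa [nmMerge, ← hc] using this

lemma nmMerge_spec (as bs : List Char) (ha : as.Pairwise (· ≤ ·)) (hb : bs.Pairwise (· ≤ ·)) :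
    (nmMerge as bs).Pairwise (· < ·) ∧ ∀ x, x ∈ nmMerge as bs ↔ as.count x ≠ bs.count x :=
  nmMerge_spec_aux (as.length + bs.length) as bs le_rfl ha hb

-- ===== VERDICT (by name: the statement is the Claim_ definition above) =====
theorem non_maching_chars_spec : Claim_equal_non_maching_chars := by
  intro str1 str2 _
  unfold Spec_non_maching_chars non_maching_chars non_maching_chars_alt
  simp only [foldl_append_if_map, List.nil_append, PySem.Dict.getD_counter]
  congr 1
  set l1 := str1.toList
  set l2 := str2.toList
  set L := (PySem.List.sorted (PySem.Set.ofList (l1 ++ l2)) (fun x => x) false).filter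
    (fun ch => decide ((l1.count ch : Int) ≠ (l2.count ch : Int))) with hL
  set R := nmMerge (PySem.List.sorted l1 (fun x => x) false)
                   (PySem.List.sorted l2 (fun x => x) false) with hR
  have hLp : L.Pairwise (· < ·) := (PySem.List.sorted_ofList_pairwise_lt _).filter _
  obtain ⟨hRp, hRm⟩ := nmMerge_spec _ _
    (PySem.List.sorted_pairwise l1 (fun x => x))
    (PySem.List.sorted_pairwise l2 (fun x => x))
  have hmem : ∀ x, x ∈ L ↔ x ∈ R := by
    intro x
    rw [hL, List.mem_filter, hR, hRm x,
      (PySem.List.sorted_perm l1 (fun x => x) false).count_eq,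
      (PySem.List.sorted_perm l2 (fun x => x) false).count_eq,
      PySem.List.mem_sorted]
    constructor
    · intro ⟨_, h⟩
      simp only [decide_eq_true_eq] at h
      exact fun he => h (by exact_mod_cast he)
    · intro h
      have hm : x ∈ l1 ++ l2 := by
        rcases Nat.eq_zero_or_pos (l1.count x) with h1 | h1
        · have h2 : 0 < l2.count x := by omega
          exact List.mem_append_right _ (List.count_pos_iff.mp h2)
        · exact List.mem_append_left _ (List.count_pos_iff.mp h1)
      refine ⟨(PySem.Set.mem_ofList _ _).mpr hm, ?_⟩
      simp only [decide_eq_true_eq]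
      exact_mod_cast h
  have hperm : L.Perm R :=
    (List.perm_ext_iff_of_nodup
      (hLp.imp (fun h => ne_of_lt h)) (hRp.imp (fun h => ne_of_lt h))).mpr hmem
  exact PySem.List.eq_of_perm_of_pairwise_le_of_injective (fun x => x)
    (fun _ _ h => h) hperm (hLp.imp le_of_lt) (hRp.imp le_of_lt)
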